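-- pv_equiv track=rewrite | github.com/wangchunliu/DRG-generation-Dutch2 | sbn_utils.py | word_level_sbn
-- ===== SOURCE A (Python) =====
-- def between_quotes(string):
--     '''Return true if a value is between quotes'''
--     return (string.startswith('"') and string.endswith('"')) or (string.startswith("'") and string.endswith("'"))
--
-- def word_level_sbn(new_clauses):
--     '''Return to string format, use char-level for concepts'''
--     return_strings = []
--     for cur_clause in new_clauses:
--         for idx, item in enumerate(cur_clause):
--             if cur_clause[idx-1] == 'Name' and between_quotes(cur_clause[idx]):
--                 cur_clause[idx] = item.strip('"')
--             if cur_clause[idx].startswith('"') and not cur_clause[idx].endswith('"'):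
--                 for j in range(idx, len(cur_clause), 1):
--                     if cur_clause[j].endswith('"'):
--                         end_index = j
--                         for index in range(idx, end_index+1):
--                             cur_clause[index] = cur_clause[index].strip('"')
--         return_strings.append(cur_clause)
--     return return_strings
-- ===== SOURCE B (Python) =====
-- def word_level_sbn(new_clauses):
--     '''Return to string format, use char-level for concepts.
--     Mutates each clause in place, like the original.'''
--     return_strings = []
--     for cur_clause in new_clauses:
--         n = len(cur_clause)
--         # one backward pass: last_close[i] = largest j >= i with cur_clause[j].endswith('"'), or None
--         last_close = [None] * n
--         last = None
--         for i in range(n - 1, -1, -1):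
--             if last is None and cur_clause[i].endswith('"'):
--                 last = i
--             last_close[i] = last
--         for idx in range(n):
--             tok = cur_clause[idx]
--             if cur_clause[idx - 1] == 'Name' and (
--                 (tok.startswith('"') and tok.endswith('"'))
--                 or (tok.startswith("'") and tok.endswith("'"))
--             ):
--                 tok = tok.strip('"')
--                 cur_clause[idx] = tok
--             if tok.startswith('"') and not tok.endswith('"'):
--                 end = last_close[idx]
--                 if end is not None:
--                     for k in range(idx, end + 1):
--                         cur_clause[k] = cur_clause[k].strip('"')
--         return_strings.append(cur_clause)
--     return return_strings
-- ===== Notes on version B (the rewrite author's own statement) =====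
-- stated objective: alternative
-- what changed: A rescans the clause forward from idx for every opening-quote token (and its no-break inner loop restrips the range once per closing token found); B instead precomputes, in one backward pass per clause, a table last_close[i] = largest j>=i whose token ends with a quote, and strips the span in a single pass per lookup.
import Mathlib
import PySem

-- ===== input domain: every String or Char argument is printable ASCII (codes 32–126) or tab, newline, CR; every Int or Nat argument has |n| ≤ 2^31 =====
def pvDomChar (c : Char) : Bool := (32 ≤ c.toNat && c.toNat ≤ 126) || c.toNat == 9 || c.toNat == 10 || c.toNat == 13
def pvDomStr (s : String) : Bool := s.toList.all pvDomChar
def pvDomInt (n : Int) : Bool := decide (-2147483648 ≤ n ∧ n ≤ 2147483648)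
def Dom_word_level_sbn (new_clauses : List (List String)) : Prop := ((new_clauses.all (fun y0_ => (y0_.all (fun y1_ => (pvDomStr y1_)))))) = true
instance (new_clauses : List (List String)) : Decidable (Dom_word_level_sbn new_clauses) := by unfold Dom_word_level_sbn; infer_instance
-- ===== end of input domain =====

-- B replaces A's repeated forward scans for a closing quote by a last-closing-quote
-- table built in one backward pass per clause (objective: alternative algorithm).
-- Python A mutates the clause lists in place and returns them; the equivalence proved
-- here is about the return value (Python B performs the same in-place mutation).

-- ===== PORT A =====
def pvBetweenQuotes (s : String) : Bool :=
  (PySem.Str.startswith s "\"" && PySem.Str.endswith s "\"") ||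
  (PySem.Str.startswith s "'" && PySem.Str.endswith s "'")

-- shared helper of both ports: the innermost loop, identical in A and B:
-- for index in range(idx, end_index+1): cur_clause[index] = cur_clause[index].strip('"')
def pvStripLoop (c : List String) (idx endIndex : Int) : List String :=
  (PySem.List.pyRange idx (endIndex + 1) 1).foldl
    (fun c index =>
      PySem.List.pySetD c index (PySem.Str.stripChars (PySem.List.pyGetD c index "") "\"")) c

-- for j in range(idx, len(cur_clause), 1): if cur_clause[j].endswith('"'): …
def pvInnerA (c : List String) (idx : Int) : List String :=
  (PySem.List.pyRange idx (c.length : Int) 1).foldl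
    (fun c j =>
      if PySem.Str.endswith (PySem.List.pyGetD c j "") "\"" then pvStripLoop c idx j
      else c) c

-- one step of `for idx, item in enumerate(cur_clause)`
def pvStepA (c : List String) (idx : Int) : List String :=
  let item := PySem.List.pyGetD c idx ""
  let c :=
    if (PySem.List.pyGetD c (idx - 1) "" == "Name") &&
        pvBetweenQuotes (PySem.List.pyGetD c idx "") then
      PySem.List.pySetD c idx (PySem.Str.stripChars item "\"")
    else c
  if PySem.Str.startswith (PySem.List.pyGetD c idx "") "\"" &&
      !(PySem.Str.endswith (PySem.List.pyGetD c idx "") "\"") then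
    pvInnerA c idx
  else c

def pvClauseA (cur : List String) : List String :=
  (PySem.List.pyRange 0 (cur.length : Int) 1).foldl pvStepA cur

def word_level_sbn (new_clauses : List (List String)) : List (List String) :=
  new_clauses.foldl (fun return_strings cur => return_strings ++ [pvClauseA cur]) []

-- ===== PORT B =====
-- one backward pass: last_close[i] = largest j >= i with cur_clause[j].endswith('"'), or None
def pvLastCloseTable (cur : List String) : List (Option Int) :=
  ((PySem.List.pyRange ((cur.length : Int) - 1) (-1) (-1)).foldl
    (fun (st : List (Option Int) × Option Int) i =>
      let last :=
        if st.2.isNone && PySem.Str.endswith (PySem.List.pyGetD cur i "") "\"" then some i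
        else st.2
      (PySem.List.pySetD st.1 i last, last))
    (List.replicate cur.length none, none)).1

def pvStepB (tbl : List (Option Int)) (c : List String) (idx : Int) : List String :=
  let tok := PySem.List.pyGetD c idx ""
  let ct :=
    if (PySem.List.pyGetD c (idx - 1) "" == "Name") &&
        ((PySem.Str.startswith tok "\"" && PySem.Str.endswith tok "\"") ||
         (PySem.Str.startswith tok "'" && PySem.Str.endswith tok "'")) then
      (PySem.List.pySetD c idx (PySem.Str.stripChars tok "\""), PySem.Str.stripChars tok "\"")
    else (c, tok)
  if PySem.Str.startswith ct.2 "\"" && !(PySem.Str.endswith ct.2 "\"") then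
    match PySem.List.pyGetD tbl idx none with
    | none => ct.1
    | some e => pvStripLoop ct.1 idx e
  else ct.1

def pvClauseB (cur : List String) : List String :=
  (PySem.List.pyRange 0 (cur.length : Int) 1).foldl (pvStepB (pvLastCloseTable cur)) cur

def word_level_sbn_alt (new_clauses : List (List String)) : List (List String) :=
  new_clauses.foldl (fun return_strings cur => return_strings ++ [pvClauseB cur]) []

-- ===== PRECONDITION & SPEC =====
def Spec_word_level_sbn (new_clauses : List (List String)) (out : List (List String)) : Prop := out = word_level_sbn_alt new_clauses
instance (new_clauses : List (List String)) (out : List (List String)) : Decidable (Spec_word_level_sbn new_clauses out) := by unfold Spec_word_level_sbn; infer_instance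

-- ===== CLAIM (what is proved, stated in full; the proofs are below) =====
def Claim_equal_word_level_sbn : Prop := ∀ (new_clauses : List (List String)), Dom_word_level_sbn new_clauses → Spec_word_level_sbn new_clauses (word_level_sbn new_clauses)

-- ===== LEMMAS AND PROOFS =====

theorem pv_head?_dropWhile {p : Char → Bool} {l : List Char} {a : Char}
    (h : (l.dropWhile p).head? = some a) : p a = false := by
  have hne : l.dropWhile p ≠ [] := by intro h0; rw [h0] at h; simp at h
  have h2 := List.head_dropWhile_not p hne
  rw [List.head?_eq_some_head hne, Option.some_inj] at h
  rw [← h]; exact h2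

theorem pv_getLast?_strip {cs q : List Char} {a : Char}
    (h : (PySem.Chars.stripChars cs q).getLast? = some a) : q.contains a = false := by
  unfold PySem.Chars.stripChars at h
  rw [List.getLast?_reverse] at h
  exact pv_head?_dropWhile h

theorem pv_head?_strip {cs q : List Char} {a : Char}
    (h : (PySem.Chars.stripChars cs q).head? = some a) : q.contains a = false := by
  unfold PySem.Chars.stripChars at h
  rw [List.head?_reverse] at h
  set p : Char → Bool := fun c => q.contains c with hp
  set u := (List.dropWhile p cs).reverse with hu
  have hsuf : List.dropWhile p u <:+ u := List.dropWhile_suffix p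
  have hne : List.dropWhile p u ≠ [] := by intro h0; rw [h0] at h; simp at h
  obtain ⟨w, hw⟩ := hsuf
  have hgl : u.getLast? = (List.dropWhile p u).getLast? := by
    conv_lhs => rw [← hw]
    exact List.getLast?_append_of_ne_nil w hne
  rw [← hgl] at h
  rw [hu, List.getLast?_reverse] at h
  exact pv_head?_dropWhile h

theorem pv_strip_strip (cs q : List Char) :
    PySem.Chars.stripChars (PySem.Chars.stripChars cs q) q = PySem.Chars.stripChars cs q := by
  have h1 : List.dropWhile (fun c => q.contains c) (PySem.Chars.stripChars cs q) = PySem.Chars.stripChars cs q := by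
    rw [List.dropWhile_eq_self_iff]
    intro hl hpa
    have hh : (PySem.Chars.stripChars cs q).head? = some ((PySem.Chars.stripChars cs q)[0]) := by
      rw [List.head?_eq_getElem?]; simp [hl]
    rw [pv_head?_strip hh] at hpa; exact absurd hpa (by simp)
  have h2 : List.dropWhile (fun c => q.contains c) (PySem.Chars.stripChars cs q).reverse = (PySem.Chars.stripChars cs q).reverse := by
    rw [List.dropWhile_eq_self_iff]
    intro hl hpa
    have hh : (PySem.Chars.stripChars cs q).getLast? = some ((PySem.Chars.stripChars cs q).reverse[0]) := by
      rw [← List.head?_reverse, List.head?_eq_getElem?, List.getElem?_eq_getElem hl]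
    rw [pv_getLast?_strip hh] at hpa; exact absurd hpa (by simp)
  conv_lhs => rw [PySem.Chars.stripChars]
  rw [h1, h2, List.reverse_reverse]

-- String-level corollaries for q = '"'
theorem pv_sw_sq (s : String) :
    PySem.Str.startswith (PySem.Str.stripChars s "\"") "\"" = false := by
  have hb : (PySem.Str.stripChars s "\"").toList = PySem.Chars.stripChars s.toList ['"'] := by
    rw [PySem.Str.toList_stripChars]; rfl
  rw [PySem.Str.startswith_eq, hb]
  show PySem.Chars.startswith _ ['"'] = false
  unfold PySem.Chars.startswith
  by_contra hc
  simp at hc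
  have hh : (PySem.Chars.stripChars s.toList ['"']).head? = some '"' := by
    rcases hc with ⟨t, ht⟩; rw [← ht]; rfl
  have := pv_head?_strip hh
  simp at this

theorem pv_sq_sq (s : String) :
    PySem.Str.stripChars (PySem.Str.stripChars s "\"") "\"" = PySem.Str.stripChars s "\"" := by
  have hb : (PySem.Str.stripChars s "\"").toList = PySem.Chars.stripChars s.toList ['"'] := by
    rw [PySem.Str.toList_stripChars]; rfl
  apply String.toList_injective  -- guess
  rw [PySem.Str.toList_stripChars, hb]
  show PySem.Chars.stripChars _ ['"'] = _
  rw [pv_strip_strip]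

-- ===== spec-level definitions =====
def pvSq (s : String) : String := PySem.Str.stripChars s "\""
def pvEwB (s : String) : Bool := PySem.Str.endswith s "\""
def pvSwB (s : String) : Bool := PySem.Str.startswith s "\""

def pvStripTo (c : List String) (a b : Nat) : List String :=
  c.mapIdx (fun i s => if a ≤ i ∧ i ≤ b then pvSq s else s)

def pvSO (c : List String) (a : Nat) : Option Nat → List String
  | none => c
  | some b => pvStripTo c a b

def pvUpd (c : List String) (acc : Option Nat) (j : Nat) : Option Nat :=
  if pvEwB (c.getD j "") then some j else acc

def pvLastEnd (c : List String) (k : Nat) : Option Nat :=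
  (List.range' k (c.length - k)).foldl (pvUpd c) none

theorem pv_sq_empty : pvSq "" = "" := by decide

theorem pv_len_stripTo (c : List String) (a b : Nat) : (pvStripTo c a b).length = c.length := by
  simp [pvStripTo]

theorem pv_getD_stripTo (c : List String) (a b j : Nat) :
    (pvStripTo c a b).getD j "" = if a ≤ j ∧ j ≤ b then pvSq (c.getD j "") else c.getD j "" := by
  by_cases hj : j < c.length
  · rw [List.getD_eq_getElem _ _ (by simpa [pv_len_stripTo] using hj), List.getD_eq_getElem _ _ hj]
    simp [pvStripTo]
  · rw [List.getD_eq_default _ _ (by simpa [pv_len_stripTo] using (Nat.le_of_not_lt hj)),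
        List.getD_eq_default _ _ (Nat.le_of_not_lt hj)]
    simp [pv_sq_empty]

theorem pv_pyRange_natCast (k n : Nat) :
    PySem.List.pyRange (k : Int) (n : Int) 1 = (List.range' k (n - k)).map (fun i : Nat => (i : Int)) := by
  rw [PySem.List.pyRange_one]
  have h1 : ((n : Int) - (k : Int)).toNat = n - k := by omega
  rw [h1]
  apply List.ext_getElem
  · simp
  · intro i h1 h2
    simp at h1 ⊢

theorem pv_len_setfold (L : List Int) (f : List String → Int → String) :
    ∀ c : List String,
      (L.foldl (fun c i => PySem.List.pySetD c i (f c i)) c).length = c.length := by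
  induction L with
  | nil => intro c; rfl
  | cons x L ih =>
      intro c
      simp only [List.foldl_cons]
      rw [ih]
      simp [PySem.List.length_pySetD]

theorem pv_len_stripLoop (c : List String) (a b : Int) :
    (pvStripLoop c a b).length = c.length := pv_len_setfold _ _ c

theorem pv_stripLoop_toStripTo (c : List String) (a b : Nat) (hab : a ≤ b) (hb : b < c.length) :
    pvStripLoop c (a : Int) (b : Int) = pvStripTo c a b := by
  induction b, hab using Nat.le_induction with
  | base =>
      unfold pvStripLoop
      have h1 : PySem.List.pyRange (a : Int) ((a : Int) + 1) 1 = [(a : Int)] := by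
        rw [PySem.List.pyRange_one_cons (by omega), PySem.List.pyRange_one_eq_nil (by omega)]
      rw [h1]
      simp only [List.foldl_cons, List.foldl_nil, PySem.List.pySetD_natCast,
        PySem.List.pyGetD_natCast]
      apply List.ext_getElem
      · simp [pv_len_stripTo]
      · intro ii hh1 hh2
        simp only [pvStripTo, List.getElem_mapIdx, List.getElem_set]
        by_cases hia : ii = a
        · subst hia
          simp [pvSq, List.getD, List.getElem?_eq_getElem (show ii < c.length by simpa using hh1)]
        · have : ¬ (a ≤ ii ∧ ii ≤ a) := by omega
          simp [Ne.symm hia, this]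
  | succ b hab ih =>
      unfold pvStripLoop
      have hcast : ((b + 1 : Nat) : Int) + 1 = ((b : Int) + 1) + 1 := by push_cast; ring
      have h1 : PySem.List.pyRange (a : Int) (((b + 1 : Nat) : Int) + 1) 1 =
          PySem.List.pyRange (a : Int) ((b : Int) + 1) 1 ++ [(b : Int) + 1] := by
        rw [hcast]
        exact PySem.List.pyRange_one_succ_right (by omega)
      rw [h1, List.foldl_append]
      have hb' : b < c.length := by omega
      have ih' := ih hb'
      unfold pvStripLoop at ih'
      rw [ih']
      simp only [List.foldl_cons, List.foldl_nil]
      have hc1 : ((b : Int) + 1) = ((b + 1 : Nat) : Int) := by push_cast; ring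
      rw [hc1, PySem.List.pySetD_natCast, PySem.List.pyGetD_natCast]
      apply List.ext_getElem
      · simp [pv_len_stripTo]
      · intro i h2 h3
        have hi : i < c.length := by simpa [pv_len_stripTo] using h3
        simp only [pvStripTo, List.getElem_mapIdx, List.getElem_set, pv_len_stripTo]
        by_cases hib : i = b + 1
        · subst hib
          have hg : (pvStripTo c a b).getD (b + 1) "" = c.getD (b + 1) "" := by
            rw [pv_getD_stripTo]
            have h4 : ¬ (a ≤ b + 1 ∧ b + 1 ≤ b) := by omega
            simp [h4]
          have h5 : a ≤ b + 1 ∧ b + 1 ≤ b + 1 := by omega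
          simp [hg, pvSq, List.getD, List.getElem?_eq_getElem hi, h5]
        · have hne : ¬ (b + 1 = i) := by omega
          simp only [hne, if_false]
          by_cases hcond : a ≤ i ∧ i ≤ b
          · have h5 : a ≤ i ∧ i ≤ b + 1 := by omega
            simp [hcond, h5]
          · by_cases h6 : a ≤ i ∧ i ≤ b + 1
            · omega
            · simp [hcond, h6]

theorem pv_len_SO (c : List String) (a : Nat) (p : Option Nat) :
    (pvSO c a p).length = c.length := by
  cases p <;> simp [pvSO, pv_len_stripTo]

theorem pv_getD_SO_of_gt (c : List String) (a : Nat) (p : Option Nat) (j : Nat)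
    (hp : ∀ J ∈ p, J < j) : (pvSO c a p).getD j "" = c.getD j "" := by
  cases p with
  | none => rfl
  | some J =>
      have := hp J rfl
      rw [pvSO, pv_getD_stripTo]
      simp
      intro _ h
      omega

theorem pv_stripTo_absorb (c : List String) (a b : Nat) (p : Option Nat)
    (hp : ∀ J ∈ p, J ≤ b) : pvStripTo (pvSO c a p) a b = pvStripTo c a b := by
  cases p with
  | none => rfl
  | some J =>
      have hJ := hp J rfl
      apply List.ext_getElem
      · simp [pv_len_stripTo, pv_len_SO]
      · intro i h1 h2
        simp only [pvSO, pvStripTo, List.getElem_mapIdx]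
        by_cases h3 : a ≤ i ∧ i ≤ J
        · have h4 : a ≤ i ∧ i ≤ b := ⟨h3.1, le_trans h3.2 hJ⟩
          simp [h3, h4, pvSq, pv_sq_sq]
        · by_cases h4 : a ≤ i ∧ i ≤ b
          · have h5 : ¬ i ≤ J := by omega
            simp [h3, h4, h5]
          · simp [h3, h4]

theorem pv_stripLoopA_eq : pvStripLoop = pvStripLoop := rfl

theorem pv_loopA_aux (c0 : List String) (a : Nat) :
    ∀ (m j : Nat) (p : Option Nat), a ≤ j → j + m ≤ c0.length →
      (∀ J ∈ p, a ≤ J ∧ J < j) →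
      (List.range' j m).foldl
        (fun (c : List String) (jj : Nat) =>
          if PySem.Str.endswith (PySem.List.pyGetD c (jj : Int) "") "\"" then
            pvStripLoop c (a : Int) (jj : Int)
          else c)
        (pvSO c0 a p)
      = pvSO c0 a ((List.range' j m).foldl (pvUpd c0) p) := by
  intro m
  induction m with
  | zero => intro j p _ _ _; rfl
  | succ m ih =>
      intro j p haj hjm hp
      rw [List.range'_succ, List.foldl_cons, List.foldl_cons]
      have hd : PySem.List.pyGetD (pvSO c0 a p) (j : Int) "" = c0.getD j "" := by
        rw [PySem.List.pyGetD_natCast]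
        exact pv_getD_SO_of_gt c0 a p j (fun J hJ => (hp J hJ).2)
      rw [hd]
      by_cases hew : PySem.Str.endswith (c0.getD j "") "\""
      · rw [if_pos hew]
        have hstep : pvStripLoop (pvSO c0 a p) (a : Int) (j : Int) = pvSO c0 a (some j) := by
          rw [pv_stripLoopA_eq]
          rw [pv_stripLoop_toStripTo (pvSO c0 a p) a j haj (by rw [pv_len_SO]; omega)]
          exact pv_stripTo_absorb c0 a j p (fun J hJ => le_of_lt (hp J hJ).2)
        rw [hstep]
        have hupd : pvUpd c0 p j = some j := by unfold pvUpd pvEwB; rw [if_pos hew]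
        rw [hupd]
        exact ih (j + 1) (some j) (by omega) (by omega)
          (by intro J hJ; simp at hJ; omega)
      · rw [if_neg hew]
        have hupd : pvUpd c0 p j = p := by unfold pvUpd pvEwB; rw [if_neg hew]
        rw [hupd]
        exact ih (j + 1) p (by omega) (by omega)
          (fun J hJ => ⟨(hp J hJ).1, by have := (hp J hJ).2; omega⟩)

theorem pv_innerA_eq (c : List String) (a : Nat) (ha : a ≤ c.length) :
    pvInnerA c (a : Int) = pvSO c a (pvLastEnd c a) := by
  unfold pvInnerA
  rw [pv_pyRange_natCast a c.length, List.foldl_map]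
  have h := pv_loopA_aux c a (c.length - a) a none (le_refl a) (by omega) (by simp)
  simpa [pvSO, pvLastEnd] using h

theorem pv_upd_init (c : List String) :
    ∀ (L : List Nat) (p : Option Nat), L.foldl (pvUpd c) p = (L.foldl (pvUpd c) none).or p := by
  intro L
  induction L with
  | nil => intro p; simp
  | cons j L ih =>
      intro p
      rw [List.foldl_cons, List.foldl_cons, ih (pvUpd c p j), ih (pvUpd c none j),
        Option.or_assoc]
      congr 1
      unfold pvUpd
      by_cases hew : pvEwB (c.getD j "") = true
      · rw [if_pos hew, if_pos hew]; rfl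
      · rw [if_neg hew, if_neg hew]; rw [Option.none_or]

theorem pv_lastEnd_len (c : List String) (t : Nat) (ht : c.length ≤ t) :
    pvLastEnd c t = none := by
  unfold pvLastEnd
  have : c.length - t = 0 := by omega
  rw [this]
  rfl


theorem pv_lastEnd_succ (c : List String) (t : Nat) (ht : t < c.length) :
    pvLastEnd c t = (pvLastEnd c (t + 1)).or (if pvEwB (c.getD t "") then some t else none) := by
  unfold pvLastEnd
  have h1 : c.length - t = (c.length - (t + 1)) + 1 := by omega
  rw [h1, List.range'_succ, List.foldl_cons, pv_upd_init c (List.range' (t + 1) _) (pvUpd c none t)]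
  congr 1

theorem pv_foldUpd_mem (c : List String) :
    ∀ (L : List Nat) (p : Option Nat) (J : Nat), L.foldl (pvUpd c) p = some J → J ∈ L ∨ p = some J := by
  intro L
  induction L with
  | nil => intro p J h; right; exact h
  | cons j L ih =>
      intro p J h
      rw [List.foldl_cons] at h
      rcases ih (pvUpd c p j) J h with h1 | h1
      · left; exact List.mem_cons_of_mem _ h1
      · unfold pvUpd at h1
        by_cases hew : pvEwB (c.getD j "")
        · rw [if_pos hew] at h1
          left
          have : j = J := by injection h1
          rw [this]; exact List.mem_cons_self
        · rw [if_neg hew] at h1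
          right; exact h1

theorem pv_lastEnd_bounds (c : List String) (k J : Nat) (h : pvLastEnd c k = some J) :
    k ≤ J ∧ J < c.length := by
  unfold pvLastEnd at h
  rcases pv_foldUpd_mem c _ none J h with h1 | h1
  · rw [List.mem_range'] at h1
    obtain ⟨i, hi, rfl⟩ := h1
    omega
  · exact absurd h1 (by simp)

theorem pv_lastEnd_congr (c c' : List String) (k : Nat) (hlen : c.length = c'.length)
    (h : ∀ j, k ≤ j → j < c.length → c.getD j "" = c'.getD j "") :
    pvLastEnd c k = pvLastEnd c' k := by
  unfold pvLastEnd
  rw [hlen]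
  apply PySem.List.foldl_congr_mem
  intro acc x hx
  rw [List.mem_range'] at hx
  obtain ⟨i, hi, rfl⟩ := hx
  unfold pvUpd
  rw [h (k + 1 * i) (by omega) (by omega)]

theorem pv_table_aux (cur : List String) :
    ∀ (m t : Nat), t + m = cur.length →
      (((List.range' t m).reverse).foldl
        (fun (st : List (Option Int) × Option Int) (i : Nat) =>
          (PySem.List.pySetD st.1 (i : Int)
            (if st.2.isNone && PySem.Str.endswith (PySem.List.pyGetD cur (i : Int) "") "\"" then some (i : Int) else st.2),
           if st.2.isNone && PySem.Str.endswith (PySem.List.pyGetD cur (i : Int) "") "\"" then some (i : Int) else st.2))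
        (List.replicate cur.length none, none)).1.length = cur.length ∧
      (((List.range' t m).reverse).foldl
        (fun (st : List (Option Int) × Option Int) (i : Nat) =>
          (PySem.List.pySetD st.1 (i : Int)
            (if st.2.isNone && PySem.Str.endswith (PySem.List.pyGetD cur (i : Int) "") "\"" then some (i : Int) else st.2),
           if st.2.isNone && PySem.Str.endswith (PySem.List.pyGetD cur (i : Int) "") "\"" then some (i : Int) else st.2))
        (List.replicate cur.length none, none)).2 = (pvLastEnd cur t).map (fun j : Nat => (j : Int)) ∧
      ∀ k, k < cur.length →
        (((List.range' t m).reverse).foldl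
          (fun (st : List (Option Int) × Option Int) (i : Nat) =>
            (PySem.List.pySetD st.1 (i : Int)
              (if st.2.isNone && PySem.Str.endswith (PySem.List.pyGetD cur (i : Int) "") "\"" then some (i : Int) else st.2),
             if st.2.isNone && PySem.Str.endswith (PySem.List.pyGetD cur (i : Int) "") "\"" then some (i : Int) else st.2))
          (List.replicate cur.length none, none)).1.getD k none =
          if t ≤ k then (pvLastEnd cur k).map (fun j : Nat => (j : Int)) else none := by
  intro m
  induction m with
  | zero =>
      intro t ht
      refine ⟨by simp, ?_, ?_⟩
      · rw [pv_lastEnd_len cur t (by omega)]; rfl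
      · intro k hk
        rw [if_neg (by omega)]
        exact List.getD_replicate _ hk
  | succ m ih =>
      intro t ht
      obtain ⟨ih1, ih2, ih3⟩ := ih (t + 1) (by omega)
      rw [List.range'_succ, List.reverse_cons, List.foldl_append]
      set st := (((List.range' (t + 1) m).reverse).foldl
        (fun (st : List (Option Int) × Option Int) (i : Nat) =>
          (PySem.List.pySetD st.1 (i : Int)
            (if st.2.isNone && PySem.Str.endswith (PySem.List.pyGetD cur (i : Int) "") "\"" then some (i : Int) else st.2),
           if st.2.isNone && PySem.Str.endswith (PySem.List.pyGetD cur (i : Int) "") "\"" then some (i : Int) else st.2))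
        (List.replicate cur.length none, none)) with hst
      simp only [List.foldl_cons, List.foldl_nil]
      have hnewl : (if st.2.isNone && PySem.Str.endswith (PySem.List.pyGetD cur (t : Int) "") "\"" then some (t : Int) else st.2)
          = (pvLastEnd cur t).map (fun j : Nat => (j : Int)) := by
        rw [ih2, pv_lastEnd_succ cur t (by omega), PySem.List.pyGetD_natCast]
        cases hle : pvLastEnd cur (t + 1) with
        | some J => simp
        | none =>
            simp only [Option.map_none, Option.isNone_none, Bool.true_and, Option.none_or]
            unfold pvEwB
            by_cases hew : PySem.Str.endswith (cur.getD t "") "\"" = true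
            · rw [if_pos hew, if_pos hew]; rfl
            · rw [if_neg hew, if_neg hew]; rfl
      refine ⟨?_, ?_, ?_⟩
      · rw [PySem.List.pySetD_natCast]
        simpa using ih1
      · exact hnewl
      · intro k hk
        rw [PySem.List.pySetD_natCast]
        by_cases hkt : k = t
        · subst hkt
          rw [List.getD_eq_getElem _ _ (by rw [List.length_set]; omega)]
          rw [List.getElem_set]
          rw [if_pos rfl, if_pos (le_refl k)]
          · exact hnewl
        · have h2 : st.1.getD k none = if t + 1 ≤ k then (pvLastEnd cur k).map (fun j : Nat => (j : Int)) else none := ih3 k hk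
          rw [List.getD_eq_getElem?_getD, List.getElem?_set_ne (by omega), ← List.getD_eq_getElem?_getD]
          rw [h2]
          by_cases h3 : t + 1 ≤ k
          · rw [if_pos h3, if_pos (by omega)]
          · rw [if_neg h3, if_neg (by omega)]

theorem pv_table_getD (cur : List String) (k : Nat) (hk : k < cur.length) :
    PySem.List.pyGetD (pvLastCloseTable cur) (k : Int) none
      = (pvLastEnd cur k).map (fun j : Nat => (j : Int)) := by
  unfold pvLastCloseTable
  have hr : PySem.List.pyRange ((cur.length : Int) - 1) (-1) (-1)
      = ((List.range' 0 cur.length).reverse).map (fun i : Nat => (i : Int)) := by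
    rw [PySem.List.pyRange_neg_one_eq_reverse]
    have h1 : (-1 : Int) + 1 = 0 := by ring
    have h2 : ((cur.length : Int) - 1) + 1 = ((cur.length : Nat) : Int) := by ring
    rw [h1, h2]
    rw [show (0 : Int) = ((0 : Nat) : Int) by rfl, pv_pyRange_natCast 0 cur.length, Nat.sub_zero, List.map_reverse]
  rw [hr, List.foldl_map, PySem.List.pyGetD_natCast]
  have h := (pv_table_aux cur cur.length 0 (by omega)).2.2 k hk
  rw [if_pos (Nat.zero_le k)] at h
  exact h

theorem pv_len_foldIf (a : Int) :
    ∀ (L : List Int) (c : List String),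
      (L.foldl (fun c j =>
        if PySem.Str.endswith (PySem.List.pyGetD c j "") "\"" then pvStripLoop c a j else c) c).length
      = c.length := by
  intro L
  induction L with
  | nil => intro c; rfl
  | cons x L ih =>
      intro c
      rw [List.foldl_cons, ih]
      by_cases h : PySem.Str.endswith (PySem.List.pyGetD c x "") "\"" = true
      · rw [if_pos h, pv_stripLoopA_eq, pv_len_stripLoop]
      · rw [if_neg h]

theorem pv_len_innerA (c : List String) (idx : Int) : (pvInnerA c idx).length = c.length := by
  unfold pvInnerA
  exact pv_len_foldIf idx _ c

theorem pv_len_stepA (c : List String) (idx : Int) : (pvStepA c idx).length = c.length := by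
  unfold pvStepA
  split_ifs with h1 <;>
    (dsimp only; split_ifs <;> simp [pv_len_innerA, PySem.List.length_pySetD])

theorem pv_step_eq (cur c : List String) (k m : Nat) (hk : k < cur.length)
    (hlen : c.length = cur.length)
    (hinv : ∀ j, k ≤ j → j < cur.length →
      c.getD j "" = if j < m then pvSq (cur.getD j "") else cur.getD j "") :
    pvStepA c (k : Int) = pvStepB (pvLastCloseTable cur) c (k : Int) ∧
    ∃ m', ∀ j, k + 1 ≤ j → j < cur.length →
      (pvStepA c (k : Int)).getD j "" = if j < m' then pvSq (cur.getD j "") else cur.getD j "" := by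
  have hkc : k < c.length := by omega
  by_cases hc1 : ((PySem.List.pyGetD c ((k : Int) - 1) "" == "Name") &&
      pvBetweenQuotes (PySem.List.pyGetD c (k : Int) "")) = true
  · -- branch 1 fires: both set index k to the stripped token, branch 2 cannot fire
    have htokset : PySem.List.pyGetD
        (PySem.List.pySetD c (k : Int) (PySem.Str.stripChars (PySem.List.pyGetD c (k : Int) "") "\"")) (k : Int) ""
        = PySem.Str.stripChars (PySem.List.pyGetD c (k : Int) "") "\"" := by
      rw [PySem.List.pySetD_natCast, PySem.List.pyGetD_natCast, List.getD_eq_getElem _ _ (by rw [List.length_set]; exact hkc), List.getElem_set]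
      rw [if_pos rfl]
    have hsw : PySem.Str.startswith (PySem.Str.stripChars (PySem.List.pyGetD c (k : Int) "") "\"") "\"" = false :=
      pv_sw_sq _
    have hstepA : pvStepA c (k : Int) =
        PySem.List.pySetD c (k : Int) (PySem.Str.stripChars (PySem.List.pyGetD c (k : Int) "") "\"") := by
      dsimp only [pvStepA]
      rw [if_pos hc1]
      rw [htokset, hsw]
      simp
    have hstepB : pvStepB (pvLastCloseTable cur) c (k : Int) =
        PySem.List.pySetD c (k : Int) (PySem.Str.stripChars (PySem.List.pyGetD c (k : Int) "") "\"") := by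
      have hc1' : ((PySem.List.pyGetD c ((k : Int) - 1) "" == "Name") &&
          ((PySem.Str.startswith (PySem.List.pyGetD c (k : Int) "") "\"" &&
            PySem.Str.endswith (PySem.List.pyGetD c (k : Int) "") "\"") ||
           (PySem.Str.startswith (PySem.List.pyGetD c (k : Int) "") "'" &&
            PySem.Str.endswith (PySem.List.pyGetD c (k : Int) "") "'"))) = true := by
        unfold pvBetweenQuotes at hc1; exact hc1
      dsimp only [pvStepB]
      rw [if_pos hc1']
      dsimp only
      rw [hsw]
      simp
    refine ⟨by rw [hstepA, hstepB], m, ?_⟩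
    intro j hj hjn
    rw [hstepA, PySem.List.pySetD_natCast, List.getD_eq_getElem?_getD,
      List.getElem?_set_ne (by omega), ← List.getD_eq_getElem?_getD]
    exact hinv j (by omega) hjn
  · -- branch 1 does not fire
    have hstepA1 : pvStepA c (k : Int) =
        (if PySem.Str.startswith (PySem.List.pyGetD c (k : Int) "") "\"" &&
            !(PySem.Str.endswith (PySem.List.pyGetD c (k : Int) "") "\"") then
          pvInnerA c (k : Int)
        else c) := by
      dsimp only [pvStepA]
      rw [if_neg hc1]
    have hstepB1 : pvStepB (pvLastCloseTable cur) c (k : Int) =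
        (if PySem.Str.startswith (PySem.List.pyGetD c (k : Int) "") "\"" &&
            !(PySem.Str.endswith (PySem.List.pyGetD c (k : Int) "") "\"") then
          (match PySem.List.pyGetD (pvLastCloseTable cur) (k : Int) none with
            | none => c
            | some e => pvStripLoop c (k : Int) e)
        else c) := by
      have hc1' : ¬ ((PySem.List.pyGetD c ((k : Int) - 1) "" == "Name") &&
          ((PySem.Str.startswith (PySem.List.pyGetD c (k : Int) "") "\"" &&
            PySem.Str.endswith (PySem.List.pyGetD c (k : Int) "") "\"") ||
           (PySem.Str.startswith (PySem.List.pyGetD c (k : Int) "") "'" &&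
            PySem.Str.endswith (PySem.List.pyGetD c (k : Int) "") "'"))) = true := by
        unfold pvBetweenQuotes at hc1; exact hc1
      dsimp only [pvStepB]
      rw [if_neg hc1']
    by_cases hc2 : (PySem.Str.startswith (PySem.List.pyGetD c (k : Int) "") "\"" &&
        !(PySem.Str.endswith (PySem.List.pyGetD c (k : Int) "") "\"")) = true
    · -- the quoted-span branch fires: the suffix from k is still the original clause
      have hmk : m ≤ k := by
        by_contra hmk
        have h1 := hinv k (le_refl k) hk
        rw [if_pos (by omega)] at h1
        have h2 : PySem.Str.startswith (PySem.List.pyGetD c (k : Int) "") "\"" = false := by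
          rw [PySem.List.pyGetD_natCast, h1]
          exact pv_sw_sq _
        rw [h2] at hc2
        simp at hc2
      have hagree : ∀ j, k ≤ j → j < c.length → c.getD j "" = cur.getD j "" := by
        intro j hj hjn
        have := hinv j hj (by omega)
        rwa [if_neg (by omega)] at this
      have hle : pvLastEnd c k = pvLastEnd cur k :=
        pv_lastEnd_congr c cur k hlen hagree
      have hA : pvStepA c (k : Int) = pvSO c k (pvLastEnd cur k) := by
        rw [hstepA1, if_pos hc2, pv_innerA_eq c k (by omega), hle]
      cases hJ : pvLastEnd cur k with
      | none =>
          have hB : pvStepB (pvLastCloseTable cur) c (k : Int) = c := by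
            rw [hstepB1, if_pos hc2, pv_table_getD cur k hk, hJ]
            rfl
          refine ⟨by rw [hA, hB, hJ]; rfl, m, ?_⟩
          rw [hA, hJ]
          intro j hj hjn
          exact hinv j (by omega) hjn
      | some J =>
          obtain ⟨hkJ, hJn⟩ := pv_lastEnd_bounds cur k J hJ
          have hB : pvStepB (pvLastCloseTable cur) c (k : Int) = pvStripTo c k J := by
            rw [hstepB1, if_pos hc2, pv_table_getD cur k hk, hJ]
            dsimp only [Option.map_some]
            exact pv_stripLoop_toStripTo c k J hkJ (by omega)
          refine ⟨by rw [hA, hB, hJ]; rfl, J + 1, ?_⟩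
          rw [hA, hJ]
          intro j hj hjn
          show (pvStripTo c k J).getD j "" = _
          rw [pv_getD_stripTo, hagree j (by omega) (by omega)]
          by_cases hjJ : j ≤ J
          · rw [if_pos ⟨by omega, hjJ⟩, if_pos (by omega)]
          · rw [if_neg (by omega), if_neg (by omega)]
    · -- neither branch fires
      have hA : pvStepA c (k : Int) = c := by rw [hstepA1, if_neg hc2]
      have hB : pvStepB (pvLastCloseTable cur) c (k : Int) = c := by rw [hstepB1, if_neg hc2]
      refine ⟨by rw [hA, hB], m, ?_⟩
      rw [hA]
      intro j hj hjn
      exact hinv j (by omega) hjn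

theorem pv_sync (cur : List String) :
    ∀ (mm k m : Nat) (c : List String), k + mm = cur.length →
      c.length = cur.length →
      (∀ j, k ≤ j → j < cur.length →
        c.getD j "" = if j < m then pvSq (cur.getD j "") else cur.getD j "") →
      (List.range' k mm).foldl (fun (c : List String) (j : Nat) => pvStepA c (j : Int)) c
      = (List.range' k mm).foldl
          (fun (c : List String) (j : Nat) => pvStepB (pvLastCloseTable cur) c (j : Int)) c := by
  intro mm
  induction mm with
  | zero => intros; rfl
  | succ mm ih =>
      intro k m c hkm hlen hinv
      rw [List.range'_succ, List.foldl_cons, List.foldl_cons]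
      obtain ⟨heq, m', hinv'⟩ := pv_step_eq cur c k m (by omega) hlen hinv
      rw [← heq]
      exact ih (k + 1) m' (pvStepA c (k : Int)) (by omega)
        (by rw [pv_len_stepA]; omega) hinv'

theorem pv_clause_eq (cur : List String) : pvClauseA cur = pvClauseB cur := by
  unfold pvClauseA pvClauseB
  rw [show (0 : Int) = ((0 : Nat) : Int) from rfl, pv_pyRange_natCast 0 cur.length,
    List.foldl_map, List.foldl_map, Nat.sub_zero]
  exact pv_sync cur cur.length 0 0 cur (by omega) rfl
    (by intro j h1 h2; rw [if_neg (by omega)])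

theorem word_level_sbn_main (new_clauses : List (List String)) :
    word_level_sbn new_clauses = word_level_sbn_alt new_clauses := by
  unfold word_level_sbn word_level_sbn_alt
  induction new_clauses using List.reverseRecOn with
  | nil => rfl
  | append_singleton xs x ih => simp [List.foldl_append, ih, pv_clause_eq]

-- ===== VERDICT (by name: the statement is the Claim_ definition above) =====
theorem word_level_sbn_spec : Claim_equal_word_level_sbn := by
  intro new_clauses _
  unfold Spec_word_level_sbn
  exact word_level_sbn_main new_clauses
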